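-- pv_equiv track=rewrite | github.com/SashoStoichkov/TUES_11_TP | homework_1/task3.py | leading
-- ===== SOURCE A (Python) =====
-- def leading(list_of_parties):
--     result_list = list()
--
--     for i in range(len(list_of_parties)):
--         result_list.append([0]*len(list_of_parties[i]))
--
--     parties = dict()
--
--     for ind in range(len(list_of_parties)):
--         for i in range(len(list_of_parties)):
--             parties[i] = list_of_parties[i][ind]
--
--         max_note = 0
--
--         for k, v in parties.items():
--             if v > max_note:
--                 max_note = v
--
--         for k, v in parties.items():
--             if v == max_note:
--                 result_list[k][ind] = 1
--
--     result_sum_list = list()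
--
--     for lst in result_list:
--         result_sum_list.append(sum(lst))
--
--     max_sum = max(result_sum_list)
--
--     for i in range(len(result_sum_list)):
--         if result_sum_list[i] == max_sum:
--             return i
-- ===== SOURCE B (Python) =====
-- def leading(list_of_parties):
--     n = len(list_of_parties)
--
--     col_max = []
--     for ind in range(n):
--         m = 0
--         for i in range(n):
--             v = list_of_parties[i][ind]
--             if v > m:
--                 m = v
--         col_max.append(m)
--
--     count = []
--     for i in range(n):
--         c = 0
--         for ind in range(n):
--             if list_of_parties[i][ind] == col_max[ind]:
--                 c += 1
--         count.append(c)
--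
--     return count.index(max(count))
-- ===== Notes on version B (the rewrite author's own statement) =====
-- stated objective: simpler
-- what changed: Replaced A's per-column dict rebuild plus an N-by-N 0/1 mark matrix that is summed afterwards by a direct two-pass computation: first a column-maxima table (seeded at 0 like A), then a row-oriented count of columns where the party attains the column maximum, returning count.index(max(count)); no dict and no mark matrix are ever built.
import Mathlib
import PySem

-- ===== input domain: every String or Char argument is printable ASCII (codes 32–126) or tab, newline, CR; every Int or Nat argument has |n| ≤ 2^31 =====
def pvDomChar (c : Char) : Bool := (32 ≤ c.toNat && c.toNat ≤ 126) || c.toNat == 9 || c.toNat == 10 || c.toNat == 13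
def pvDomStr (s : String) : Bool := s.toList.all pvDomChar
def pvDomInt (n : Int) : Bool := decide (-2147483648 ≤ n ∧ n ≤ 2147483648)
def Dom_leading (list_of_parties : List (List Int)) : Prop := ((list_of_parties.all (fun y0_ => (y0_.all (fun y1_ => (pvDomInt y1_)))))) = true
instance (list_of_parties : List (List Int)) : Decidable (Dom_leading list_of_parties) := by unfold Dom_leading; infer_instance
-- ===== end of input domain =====

-- B replaces A's per-column dict rebuild and N×N mark matrix by a column-maxima table plus a row count (simpler decomposition, same cost).


-- ===== PORT A =====
-- helper: A's final 'for i in range(len(result_sum_list)): if result_sum_list[i] == max_sum: return i' scan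
def leadingScan : List Int → Int → Int → Option Int
  | [], _, _ => none
  | x :: xs, m, i => if x == m then some i else leadingScan xs m (i + 1)

-- helper: the body of A's outer 'for ind in range(len(list_of_parties))' loop
def leadingStep (list_of_parties : List (List Int))
    (st : List (List Int) × PySem.Dict Int Int) (ind : Int) :
    List (List Int) × PySem.Dict Int Int :=
  let parties :=
    (PySem.List.pyRange 0 (list_of_parties.length : Int) 1).foldl
      (fun d i => d.insert i
        (PySem.List.pyGetD (PySem.List.pyGetD list_of_parties i []) ind 0)) st.2
  let max_note := parties.items.foldl (fun m kv => if kv.2 > m then kv.2 else m) (0 : Int)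
  let rl := parties.items.foldl
    (fun rl kv =>
      if kv.2 == max_note then
        PySem.List.pySetD rl kv.1 (PySem.List.pySetD (PySem.List.pyGetD rl kv.1 []) ind 1)
      else rl) st.1
  (rl, parties)

def leading (list_of_parties : List (List Int)) : Int :=
  let n : Int := list_of_parties.length
  let result_list : List (List Int) :=
    (PySem.List.pyRange 0 n 1).foldl
      (fun acc i => acc ++ [List.replicate (PySem.List.pyGetD list_of_parties i []).length (0 : Int)]) []
  let st := (PySem.List.pyRange 0 n 1).foldl (leadingStep list_of_parties) (result_list, PySem.Dict.empty)
  let result_sum_list : List Int := st.1.foldl (fun acc lst => acc ++ [lst.sum]) []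
  let max_sum := (PySem.List.max? result_sum_list (fun x => x)).getD 0
  (leadingScan result_sum_list max_sum 0).getD 0

-- ===== PORT B =====
def leading_alt (list_of_parties : List (List Int)) : Int :=
  let n : Int := list_of_parties.length
  let col_max : List Int :=
    (PySem.List.pyRange 0 n 1).foldl
      (fun acc ind =>
        acc ++ [(PySem.List.pyRange 0 n 1).foldl
          (fun m i =>
            let v := PySem.List.pyGetD (PySem.List.pyGetD list_of_parties i []) ind 0
            if v > m then v else m) 0]) []
  let count : List Int :=
    (PySem.List.pyRange 0 n 1).foldl
      (fun acc i =>
        acc ++ [(PySem.List.pyRange 0 n 1).foldl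
          (fun c ind =>
            if PySem.List.pyGetD (PySem.List.pyGetD list_of_parties i []) ind 0 ==
               PySem.List.pyGetD col_max ind 0 then c + 1 else c) (0 : Int)]) []
  let mx := (PySem.List.max? count (fun x => x)).getD 0
  ((PySem.List.index? count mx).map (fun k => (k : Int))).getD 0

-- ===== PRECONDITION & SPEC =====
-- Pre_ excludes exactly the inputs where A raises: the empty list (ValueError from max() of an empty
-- sequence) and ragged inputs with a row shorter than the number of parties (IndexError on list_of_parties[i][ind]).
def Pre_leading (list_of_parties : List (List Int)) : Prop :=
  list_of_parties ≠ [] ∧ ∀ row ∈ list_of_parties, list_of_parties.length ≤ row.length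
instance (list_of_parties : List (List Int)) : Decidable (Pre_leading list_of_parties) := by
  unfold Pre_leading; infer_instance
def pvWitness_leading : List (List Int) := [[3, 1], [2, 5]]

def Spec_leading (list_of_parties : List (List Int)) (out : Int) : Prop := out = leading_alt list_of_parties
instance (list_of_parties : List (List Int)) (out : Int) : Decidable (Spec_leading list_of_parties out) := by unfold Spec_leading; infer_instance

-- ===== CLAIM (what is proved, stated in full; the proofs are below) =====
def Claim_equal_leading : Prop := ∀ (list_of_parties : List (List Int)), Dom_leading list_of_parties → Pre_leading list_of_parties → Spec_leading list_of_parties (leading list_of_parties)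

-- ===== LEMMAS AND PROOFS =====

-- row i, the value of party i in column c, the (0-seeded) column maximum, the "attains the maximum" test
def pvRow (lop : List (List Int)) (i : Nat) : List Int := lop.getD i []
def pvVal (lop : List (List Int)) (i c : Nat) : Int := (pvRow lop i).getD c 0
def pvCmax (lop : List (List Int)) (c : Nat) : Int :=
  (List.range lop.length).foldl (fun m k => if pvVal lop k c > m then pvVal lop k c else m) 0
def pvCond (lop : List (List Int)) (i c : Nat) : Bool := pvVal lop i c == pvCmax lop c
-- A's 0/1 mark row for party i after the first t columns have been processed
def pvMark (lop : List (List Int)) (i t : Nat) : List Int :=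
  (List.range (pvRow lop i).length).map (fun c => if (decide (c < t) && pvCond lop i c) = true then (1 : Int) else 0)
def pvCnt (lop : List (List Int)) (i : Nat) : Int := ((List.range lop.length).countP (pvCond lop i) : Int)
def pvS (lop : List (List Int)) : List Int := (List.range lop.length).map (pvCnt lop)
-- the common value of both programs: first index of the maximal per-party count
def pvAns (lop : List (List Int)) : Int :=
  ((PySem.List.index? (pvS lop) ((PySem.List.max? (pvS lop) (fun x => x)).getD 0)).map (fun k => (k : Int))).getD 0

-- the 0-seeded running-max fold over column t equals pvCmax (range written as a map over List.range)
lemma pv_colmax_fold' (lop : List (List Int)) (t : Nat) :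
    List.foldl
      (fun m i =>
        if PySem.List.pyGetD (PySem.List.pyGetD lop i []) (t : Int) 0 > m then
          PySem.List.pyGetD (PySem.List.pyGetD lop i []) (t : Int) 0 else m) 0
      (List.map (fun k => ((k : Nat) : Int)) (List.range lop.length))
    = pvCmax lop t := by
  rw [List.foldl_map]
  simp [pvCmax, pvVal, pvRow]

-- the same, with the range written as pyRange (the form A's dict values produce)
lemma pv_colmax_fold (lop : List (List Int)) (t : Nat) :
    (PySem.List.pyRange 0 (lop.length : Int) 1).foldl
      (fun m i =>
        if PySem.List.pyGetD (PySem.List.pyGetD lop i []) (t : Int) 0 > m then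
          PySem.List.pyGetD (PySem.List.pyGetD lop i []) (t : Int) 0 else m) 0
    = pvCmax lop t := by
  rw [PySem.List.pyRange_zero_natCast]
  exact pv_colmax_fold' lop t

-- A's final scan is index? shifted by the start accumulator
lemma pv_scan_eq (m : Int) (l : List Int) :
    ∀ i : Int, leadingScan l m i = (PySem.List.index? l m).map (fun k => i + (k : Int)) := by
  induction l with
  | nil => intro i; simp [leadingScan, PySem.List.index?]
  | cons x xs ih =>
    intro i
    by_cases hx : x = m
    · subst hx
      rw [PySem.List.index?_cons_self]
      simp [leadingScan]
    · rw [PySem.List.index?_cons_of_ne _ hx]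
      simp only [leadingScan, beq_iff_eq, if_neg hx, ih (i + 1)]
      cases PySem.List.index? xs m with
      | none => rfl
      | some k => simp; ring

-- folding overwriting inserts over keys already present (in this order) rewrites the values in place
lemma pv_dict_overwrite (f : Int → Int) :
    ∀ (L : List Int) (g : Int → Int) (M : List Int) (d : PySem.Dict Int Int),
      (∀ a ∈ L, a ∈ M) → d.items = M.map (fun i => (i, g i)) →
      (L.foldl (fun d i => d.insert i (f i)) d).items
        = M.map (fun i => (i, if i ∈ L then f i else g i)) := by
  intro L
  induction L with
  | nil => intro g M d _ hd; simpa using hd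
  | cons a L ih =>
    intro g M d hsub hd
    have haM : a ∈ M := hsub a (by simp)
    have hcont : d.contains a = true := by
      rw [PySem.Dict.contains_iff_mem_keys]
      have : d.keys = M := by
        simp only [PySem.Dict.keys, hd, List.map_map]
        exact List.map_id'' (congrFun rfl) M
      rw [this]; exact haM
    have hins : (d.insert a (f a)).items = M.map (fun i => (i, if i = a then f a else g i)) := by
      rw [PySem.Dict.items_insert_of_contains d (f a) hcont, hd, List.map_map]
      refine List.map_congr_left ?_
      intro i _
      by_cases hia : i = a
      · subst hia; simp
      · simp [Function.comp, hia]
    have := ih (fun i => if i = a then f a else g i) M (d.insert a (f a))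
      (fun b hb => hsub b (by simp [hb])) hins
    rw [List.foldl_cons, this]
    refine List.map_congr_left ?_
    intro i _
    by_cases hiL : i ∈ L
    · simp [hiL]
    · by_cases hia : i = a <;> simp [hiL, hia]

-- after A's inner 'parties[i] = …' loop the dict is exactly the graph of the column, in key order
lemma pv_dict_full (lop : List (List Int)) (f : Int → Int) (d : PySem.Dict Int Int)
    (h : d = PySem.Dict.empty ∨ ∃ g : Int → Int,
      d.items = (PySem.List.pyRange 0 (lop.length : Int) 1).map (fun i => (i, g i))) :
    ((PySem.List.pyRange 0 (lop.length : Int) 1).foldl (fun d i => d.insert i (f i)) d).items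
      = (PySem.List.pyRange 0 (lop.length : Int) 1).map (fun i => (i, f i)) := by
  rcases h with h | ⟨g, hg⟩
  · subst h
    have := PySem.Dict.items_foldl_insert_fresh (PySem.List.pyRange 0 (lop.length : Int) 1)
      (fun a => a) f PySem.Dict.empty
      (fun a _ => PySem.Dict.contains_empty a)
      (by simpa using PySem.List.nodup_pyRange_one 0 (lop.length : Int))
    simpa using this
  · rw [pv_dict_overwrite f _ g _ d (fun a ha => ha) hg]
    refine List.map_congr_left ?_
    intro i hi
    simp [hi]

-- a loop that conditionally rewrites row k at step k acts pointwise on a map over range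
lemma pv_foldl_set_rows_aux (M : Nat) (orig new : Nat → List Int) (c : Nat → Bool)
    (u : List Int → List Int) (h : ∀ i < M, new i = if c i then u (orig i) else orig i) :
    ∀ j ≤ M, (List.range j).foldl
        (fun rl k => if c k then rl.set k (u (rl.getD k [])) else rl)
        ((List.range M).map orig)
      = (List.range M).map (fun i => if i < j then new i else orig i) := by
  intro j
  induction j with
  | zero =>
    intro _
    refine List.map_congr_left ?_
    intro i _; simp
  | succ j ih =>
    intro hj
    have hjM : j < M := hj
    rw [List.range_succ, List.foldl_append, ih (le_of_lt hjM), List.foldl_cons, List.foldl_nil]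
    have hget : (((List.range M).map (fun i => if i < j then new i else orig i)).getD j []) = orig j := by
      rw [PySem.List.getD_map_range _ _ _ _ hjM]
      simp
    by_cases hc : c j
    · rw [if_pos hc, hget]
      apply List.ext_getElem
      · simp
      · intro i hi1 hi2
        simp only [List.length_set, List.length_map, List.length_range] at hi1 hi2 ⊢
        rw [List.getElem_set]
        by_cases hij : j = i
        · subst hij
          simp [h j hjM, hc]
        · rw [if_neg hij]
          simp only [List.getElem_map, List.getElem_range]
          by_cases hij2 : i < j
          · rw [if_pos hij2, if_pos (by omega)]
          · rw [if_neg hij2, if_neg (by omega)]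
    · rw [if_neg hc]
      refine List.map_congr_left ?_
      intro i hi
      by_cases hij : i = j
      · subst hij
        rw [if_neg (by omega), if_pos (by omega), h i (by simpa using hi), if_neg hc]
      · by_cases hij2 : i < j
        · rw [if_pos hij2, if_pos (by omega)]
        · rw [if_neg hij2, if_neg (by omega)]

lemma pv_foldl_set_rows (M : Nat) (orig new : Nat → List Int) (c : Nat → Bool)
    (u : List Int → List Int) (h : ∀ i < M, new i = if c i then u (orig i) else orig i) :
    (List.range M).foldl
        (fun rl k => if c k then rl.set k (u (rl.getD k [])) else rl)
        ((List.range M).map orig)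
      = (List.range M).map new := by
  rw [pv_foldl_set_rows_aux M orig new c u h M (le_refl M)]
  refine List.map_congr_left ?_
  intro i hi
  rw [if_pos (by simpa using hi)]

lemma pv_mark_zero (lop : List (List Int)) (i : Nat) :
    pvMark lop i 0 = List.replicate (pvRow lop i).length 0 := by
  unfold pvMark
  rw [List.eq_replicate_iff]
  constructor
  · simp
  · intro b hb
    rcases List.mem_map.mp hb with ⟨c, _, hc⟩
    simpa using hc.symm

lemma pv_mark_succ (lop : List (List Int)) (i t : Nat) (ht : t < lop.length)
    (hlen : lop.length ≤ (pvRow lop i).length) :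
    pvMark lop i (t + 1)
      = if pvCond lop i t then (pvMark lop i t).set t 1 else pvMark lop i t := by
  have htl : t < (pvRow lop i).length := lt_of_lt_of_le ht hlen
  by_cases hc : pvCond lop i t
  · rw [if_pos hc]
    apply List.ext_getElem
    · simp [pvMark]
    · intro c h1 h2
      simp only [pvMark, List.length_map, List.length_range] at h1 h2
      rw [List.getElem_set]
      by_cases htc : t = c
      · subst htc
        simp [pvMark, hc]
      · rw [if_neg htc]
        simp only [pvMark, List.getElem_map, List.getElem_range]
        have hd : decide (c < t + 1) = decide (c < t) := by
          simp only [decide_eq_decide]; omega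
        rw [hd]
  · rw [if_neg hc]
    unfold pvMark
    refine List.map_congr_left ?_
    intro c _
    have hd : (decide (c < t + 1) && pvCond lop i c) = (decide (c < t) && pvCond lop i c) := by
      by_cases htc : c = t
      · subst htc; simp [hc]
      · have hdd : decide (c < t + 1) = decide (c < t) := by
          simp only [decide_eq_decide]; omega
        rw [hdd]
    rw [hd]

lemma pv_mark_sum (lop : List (List Int)) (i : Nat)
    (hlen : lop.length ≤ (pvRow lop i).length) :
    (pvMark lop i lop.length).sum = pvCnt lop i := by
  unfold pvMark pvCnt
  rw [PySem.List.sum_map_ite_one_zero]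
  congr 1
  have hL : (pvRow lop i).length = lop.length + ((pvRow lop i).length - lop.length) := by omega
  rw [hL, List.range_add, List.countP_append]
  have h2 : List.countP (fun c => decide (c < lop.length) && pvCond lop i c)
      (List.map (fun x => lop.length + x) (List.range ((pvRow lop i).length - lop.length))) = 0 := by
    rw [List.countP_eq_zero]
    intro a ha
    rcases List.mem_map.mp ha with ⟨x, _, hx⟩
    subst hx
    simp
  rw [h2, Nat.add_zero]
  apply List.countP_congr
  intro x hx
  simp [List.mem_range.mp hx]

-- one pass of A's outer loop, on a state satisfying the invariant
lemma pv_step (lop : List (List Int)) (t : Nat) (ht : t < lop.length)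
    (hpre : ∀ row ∈ lop, lop.length ≤ row.length)
    (st : List (List Int) × PySem.Dict Int Int)
    (h1 : st.1 = (List.range lop.length).map (fun i => pvMark lop i t))
    (h2 : st.2 = PySem.Dict.empty ∨ ∃ g : Int → Int,
      st.2.items = (PySem.List.pyRange 0 (lop.length : Int) 1).map (fun i => (i, g i))) :
    (leadingStep lop st (t : Int)).1
        = (List.range lop.length).map (fun i => pvMark lop i (t + 1))
      ∧ ∃ g : Int → Int, (leadingStep lop st (t : Int)).2.items
        = (PySem.List.pyRange 0 (lop.length : Int) 1).map (fun i => (i, g i)) := by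
  have hitems : ((PySem.List.pyRange 0 (lop.length : Int) 1).foldl
      (fun d i => d.insert i (PySem.List.pyGetD (PySem.List.pyGetD lop i []) ((t : Nat) : Int) 0)) st.2).items
      = (PySem.List.pyRange 0 (lop.length : Int) 1).map
          (fun i => (i, PySem.List.pyGetD (PySem.List.pyGetD lop i []) ((t : Nat) : Int) 0)) :=
    pv_dict_full lop _ st.2 h2
  have hrows : ∀ i < lop.length, lop.length ≤ (pvRow lop i).length := by
    intro i hi
    have : pvRow lop i ∈ lop := by
      unfold pvRow
      rw [List.getD_eq_getElem _ _ hi]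
      exact List.getElem_mem hi
    exact hpre _ this
  constructor
  · have hmax : List.foldl (fun (m : Int) (kv : Int × Int) => if kv.2 > m then kv.2 else m) 0
        ((PySem.List.pyRange 0 (lop.length : Int) 1).map
          (fun i => (i, PySem.List.pyGetD (PySem.List.pyGetD lop i []) ((t : Nat) : Int) 0)))
        = pvCmax lop t := by
      rw [List.foldl_map]; exact pv_colmax_fold lop t
    simp only [leadingStep]
    simp only [hitems, hmax]
    rw [List.foldl_map, PySem.List.pyRange_zero_natCast, List.foldl_map, h1]
    simp only [PySem.List.pyGetD_natCast, PySem.List.pySetD_natCast]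
    exact pv_foldl_set_rows lop.length (fun i => pvMark lop i t) (fun i => pvMark lop i (t + 1))
      (fun k => pvCond lop k t) (fun row => row.set t 1)
      (fun i hi => pv_mark_succ lop i t ht (hrows i hi))
  · refine ⟨fun i => PySem.List.pyGetD (PySem.List.pyGetD lop i []) ((t : Nat) : Int) 0, ?_⟩
    simp only [leadingStep]
    exact hitems

-- A's outer-loop invariant: after t columns the matrix is the mark table for t, the dict stays well-formed
lemma pv_a_inv (lop : List (List Int)) (hpre : ∀ row ∈ lop, lop.length ≤ row.length) :
    ∀ t : Nat, t ≤ lop.length →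
    ((PySem.List.pyRange 0 (t : Int) 1).foldl (leadingStep lop)
        ((List.range lop.length).map (fun i => pvMark lop i 0), PySem.Dict.empty)).1
      = (List.range lop.length).map (fun i => pvMark lop i t)
    ∧ (((PySem.List.pyRange 0 (t : Int) 1).foldl (leadingStep lop)
        ((List.range lop.length).map (fun i => pvMark lop i 0), PySem.Dict.empty)).2
          = PySem.Dict.empty
      ∨ ∃ g : Int → Int,
        ((PySem.List.pyRange 0 (t : Int) 1).foldl (leadingStep lop)
          ((List.range lop.length).map (fun i => pvMark lop i 0), PySem.Dict.empty)).2.items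
          = (PySem.List.pyRange 0 (lop.length : Int) 1).map (fun i => (i, g i))) := by
  intro t
  induction t with
  | zero =>
    intro _
    constructor
    · simp [PySem.List.pyRange]
    · left; simp [PySem.List.pyRange]
  | succ t ih =>
    intro ht
    have ht' : t < lop.length := ht
    obtain ⟨ih1, ih2⟩ := ih (le_of_lt ht')
    have hsplit : PySem.List.pyRange 0 ((t + 1 : Nat) : Int) 1
        = PySem.List.pyRange 0 (t : Int) 1 ++ [(t : Int)] := by
      have : ((t + 1 : Nat) : Int) = (t : Int) + 1 := by push_cast; ring
      rw [this, PySem.List.pyRange_one_succ_right (by positivity)]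
    rw [hsplit, List.foldl_append, List.foldl_cons, List.foldl_nil]
    have := pv_step lop t ht' hpre _ ih1 ih2
    exact ⟨this.1, Or.inr this.2⟩

lemma pv_a_eq (lop : List (List Int)) (hpre : ∀ row ∈ lop, lop.length ≤ row.length) :
    leading lop = pvAns lop := by
  have hrows : ∀ i < lop.length, lop.length ≤ (pvRow lop i).length := by
    intro i hi
    have : pvRow lop i ∈ lop := by
      unfold pvRow
      rw [List.getD_eq_getElem _ _ hi]
      exact List.getElem_mem hi
    exact hpre _ this
  have hinit : ((PySem.List.pyRange 0 (lop.length : Int) 1).foldl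
      (fun acc i => acc ++ [List.replicate (PySem.List.pyGetD lop i []).length (0 : Int)]) [])
      = (List.range lop.length).map (fun i => pvMark lop i 0) := by
    rw [PySem.List.foldl_append_singleton_eq_map, List.nil_append,
      PySem.List.pyRange_zero_natCast, List.map_map]
    refine List.map_congr_left ?_
    intro i _
    simp only [Function.comp, PySem.List.pyGetD_natCast]
    exact (pv_mark_zero lop i).symm
  have hst := (pv_a_inv lop hpre lop.length (le_refl _)).1
  have hsum : (List.map (fun i => pvMark lop i lop.length) (List.range lop.length)).foldl
      (fun acc lst => acc ++ [lst.sum]) [] = pvS lop := by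
    rw [PySem.List.foldl_append_singleton_eq_map, List.nil_append, List.map_map]
    refine List.map_congr_left ?_
    intro i hi
    simp only [Function.comp]
    exact pv_mark_sum lop i (hrows i (by simpa using hi))
  simp only [leading, hinit, hst, hsum]
  rw [pv_scan_eq]
  unfold pvAns
  cases PySem.List.index? (pvS lop) ((PySem.List.max? (pvS lop) fun x => x).getD 0) with
  | none => rfl
  | some k => simp

lemma pv_b_eq (lop : List (List Int)) : leading_alt lop = pvAns lop := by
  have hcm : ((PySem.List.pyRange 0 (lop.length : Int) 1).foldl
      (fun acc ind =>
        acc ++ [(PySem.List.pyRange 0 (lop.length : Int) 1).foldl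
          (fun m i =>
            if PySem.List.pyGetD (PySem.List.pyGetD lop i []) ind 0 > m then
              PySem.List.pyGetD (PySem.List.pyGetD lop i []) ind 0 else m) 0]) [])
      = (List.range lop.length).map (fun t => pvCmax lop t) := by
    rw [PySem.List.foldl_append_singleton_eq_map, List.nil_append,
      PySem.List.pyRange_zero_natCast, List.map_map]
    refine List.map_congr_left ?_
    intro t _
    simp only [Function.comp]
    exact pv_colmax_fold' lop t
  have hcnt : ((PySem.List.pyRange 0 (lop.length : Int) 1).foldl
      (fun acc i =>
        acc ++ [(PySem.List.pyRange 0 (lop.length : Int) 1).foldl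
          (fun c ind =>
            if PySem.List.pyGetD (PySem.List.pyGetD lop i []) ind 0 ==
               PySem.List.pyGetD ((List.range lop.length).map (fun t => pvCmax lop t)) ind 0
            then c + 1 else c) (0 : Int)]) [])
      = pvS lop := by
    rw [PySem.List.foldl_append_singleton_eq_map, List.nil_append,
      PySem.List.pyRange_zero_natCast, List.map_map]
    refine List.map_congr_left ?_
    intro k hk
    simp only [Function.comp]
    rw [List.foldl_map]
    rw [PySem.List.foldl_congr_mem _ _ (fun (c : Int) (t : Nat) => if pvCond lop k t then c + 1 else c) 0 ?_]
    · rw [PySem.List.foldl_count_if]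
      simp [pvCnt]
    · intro acc t htm
      have ht : t < lop.length := List.mem_range.mp htm
      simp only [PySem.List.pyGetD_natCast]
      rw [PySem.List.getD_map_range _ _ _ _ ht]
      rfl
  simp only [leading_alt, hcm, hcnt]
  rfl

-- ===== VERDICT (by name: the statement is the Claim_ definition above) =====
theorem leading_spec : Claim_equal_leading := by
  intro lop _ hpre
  unfold Spec_leading
  rw [pv_a_eq lop hpre.2, pv_b_eq lop]
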